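-- pv_equiv track=rewrite | github.com/nasa-jpl/ION-DTN | tests/pylib/blocklist.py | blocksToLengthBlocks
-- ===== SOURCE A (Python) =====
-- def blocksToLengthBlocks(blocks):
--     toReturn = [ ]
--     lastEnd = None
--     for i in blocks:
--         if (lastEnd == None):
--             toReturn.append((i[0], i[1] - i[0] + 1))
--         else:
--             toReturn.append((i[0]-lastEnd, i[1]-i[0] + 1))
--         lastEnd = i[1]
--     return toReturn
-- ===== SOURCE B (Python) =====
-- def blocksToLengthBlocks(blocks):
--     # Flatten blocks to the coordinate stream [s0,e0,s1,e1,...], take consecutive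
--     # differences, then regroup: first output is (s0, diff0+1); thereafter each
--     # (gap, length) pair is two consecutive differences (gap, diff+1).
--     flat = [x for blk in blocks for x in blk]
--     if not flat:
--         return []
--     diffs = [b - a for a, b in zip(flat, flat[1:])]
--     out = [(flat[0], diffs[0] + 1)]
--     rest = diffs[1:]
--     while rest:
--         out.append((rest[0], rest[1] + 1))
--         rest = rest[2:]
--     return out
-- ===== Notes on version B (the rewrite author's own statement) =====
-- stated objective: alternative
-- what changed: B flattens the blocks into the single coordinate stream [s0,e0,s1,e1,...], takes consecutive differences of that stream, and regroups the difference list two at a time into (gap, length+?) pairs, instead of A's loop over blocks threading a lastEnd accumulator.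
import Mathlib
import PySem

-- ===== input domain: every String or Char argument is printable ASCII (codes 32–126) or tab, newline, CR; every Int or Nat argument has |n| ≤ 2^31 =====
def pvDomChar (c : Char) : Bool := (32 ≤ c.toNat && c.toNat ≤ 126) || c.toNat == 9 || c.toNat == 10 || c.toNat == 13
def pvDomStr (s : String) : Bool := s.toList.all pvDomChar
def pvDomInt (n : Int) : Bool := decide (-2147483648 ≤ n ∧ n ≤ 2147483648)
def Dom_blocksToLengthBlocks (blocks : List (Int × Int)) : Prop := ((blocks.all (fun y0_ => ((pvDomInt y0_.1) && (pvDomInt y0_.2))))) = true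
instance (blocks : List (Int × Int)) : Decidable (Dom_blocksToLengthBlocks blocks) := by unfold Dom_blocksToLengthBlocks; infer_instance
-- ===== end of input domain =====

-- B flattens the blocks to one coordinate stream, takes consecutive differences and regroups them in pairs, replacing A's lastEnd-threading loop; alternative decomposition, same cost.


-- ===== PORT A =====
-- Port of A: one fold threading (toReturn, lastEnd) exactly as the Python loop does.
def blocksToLengthBlocks (blocks : List (Int × Int)) : List (Int × Int) :=
  (blocks.foldl
    (fun (st : List (Int × Int) × Option Int) i =>
      match st.2 with
      | none => (st.1 ++ [(i.1, i.2 - i.1 + 1)], some i.2)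
      | some lastEnd => (st.1 ++ [(i.1 - lastEnd, i.2 - i.1 + 1)], some i.2))
    ([], none)).1

-- ===== PORT B =====
-- consecutive differences of a stream: [b - a for a, b in zip(flat, flat[1:])]
def pvDiffs (xs : List Int) : List Int := (xs.zip xs.tail).map (fun p => p.2 - p.1)

-- the while loop: consume the remaining difference list two at a time
def pvRegroup : List Int → List (Int × Int)
  | g :: l :: r => (g, l + 1) :: pvRegroup r
  | _ => []

-- Port of B: flatten → consecutive differences → regroup in pairs.
def blocksToLengthBlocks_alt (blocks : List (Int × Int)) : List (Int × Int) :=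
  let flat := blocks.flatMap (fun blk => [blk.1, blk.2])
  match flat, pvDiffs flat with
  | x :: _, d :: rest => (x, d + 1) :: pvRegroup rest
  | _, _ => []

-- ===== PRECONDITION & SPEC =====
def Spec_blocksToLengthBlocks (blocks : List (Int × Int)) (out : List (Int × Int)) : Prop := out = blocksToLengthBlocks_alt blocks
instance (blocks : List (Int × Int)) (out : List (Int × Int)) : Decidable (Spec_blocksToLengthBlocks blocks out) := by unfold Spec_blocksToLengthBlocks; infer_instance

-- ===== CLAIM (what is proved, stated in full; the proofs are below) =====
def Claim_equal_blocksToLengthBlocks : Prop := ∀ (blocks : List (Int × Int)), Dom_blocksToLengthBlocks blocks → Spec_blocksToLengthBlocks blocks (blocksToLengthBlocks blocks)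

-- ===== LEMMAS AND PROOFS =====
theorem pvDiffs_cons_cons (a b : Int) (r : List Int) :
    pvDiffs (a :: b :: r) = (b - a) :: pvDiffs (b :: r) := by
  simp [pvDiffs]

theorem foldA_eq_regroup (l : List (Int × Int)) :
    ∀ (acc : List (Int × Int)) (e : Int),
      (l.foldl
        (fun (st : List (Int × Int) × Option Int) i =>
          match st.2 with
          | none => (st.1 ++ [(i.1, i.2 - i.1 + 1)], some i.2)
          | some lastEnd => (st.1 ++ [(i.1 - lastEnd, i.2 - i.1 + 1)], some i.2))
        (acc, some e)).1
      = acc ++ pvRegroup (pvDiffs (e :: l.flatMap (fun blk => [blk.1, blk.2]))) := by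
  induction l with
  | nil => intro acc e; simp [pvDiffs, pvRegroup]
  | cons c t ih =>
      intro acc e
      simp only [List.foldl_cons, List.flatMap_cons, List.cons_append, List.nil_append]
      rw [pvDiffs_cons_cons, pvDiffs_cons_cons]
      simp only [pvRegroup]
      rw [ih (acc ++ [(c.1 - e, c.2 - c.1 + 1)]) c.2]
      simp

-- ===== VERDICT (by name: the statement is the Claim_ definition above) =====
theorem blocksToLengthBlocks_spec : Claim_equal_blocksToLengthBlocks := by
  intro blocks _
  unfold Spec_blocksToLengthBlocks blocksToLengthBlocks blocksToLengthBlocks_alt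
  cases blocks with
  | nil => rfl
  | cons b rest =>
      simp only [List.foldl_cons, List.flatMap_cons, List.cons_append, List.nil_append]
      rw [foldA_eq_regroup rest [(b.1, b.2 - b.1 + 1)] b.2]
      rw [pvDiffs_cons_cons]
      simp
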